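-- pv_equiv track=rewrite | github.com/jonasvandervennet/adventofcode | 2019/03/part 1/main.py | get_wire_paths
-- ===== SOURCE A (Python) =====
-- def move_amount(start, offset, amount):
--     return [
--         (start[0] + (i + 1) * offset[0], start[1] + (i + 1) * offset[1])
--         for i in range(amount)]
--
-- def get_wire_paths(wire_movement, start=(0, 0)):
--     visited = [start]
--     for movement in wire_movement:
--         direction = movement[0]
--         amount = int(movement[1:])
--         if direction == 'U':
--             offset = (0, 1)
--         elif direction == 'D':
--             offset = (0, -1)
--         elif direction == 'R':
--             offset = (1, 0)
--         elif direction == 'L':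
--             offset = (-1, 0)
--         else:
--             raise ValueError(f'Recieved invalid movement direction: {direction}')
--         visited = visited + move_amount(visited[-1], offset, amount)
--     return visited
-- ===== SOURCE B (Python) =====
-- OFFSETS = {'U': (0, 1), 'D': (0, -1), 'R': (1, 0), 'L': (-1, 0)}
--
--
-- def get_wire_paths(wire_movement, start=(0, 0)):
--     # pass 1: decode every movement into a flat list of unit steps
--     steps = []
--     for movement in wire_movement:
--         direction = movement[0]
--         if direction not in OFFSETS:
--             raise ValueError(f'Recieved invalid movement direction: {direction}')
--         steps += [OFFSETS[direction]] * int(movement[1:])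
--     # pass 2: prefix-sum the steps from start
--     visited = [start]
--     x, y = start
--     for dx, dy in steps:
--         x += dx
--         y += dy
--         visited.append((x, y))
--     return visited
-- ===== Notes on version B (the rewrite author's own statement) =====
-- stated objective: alternative
-- what changed: Replaces A's grow-by-concatenation loop that recomputes each block from visited[-1] with the closed (i+1)*offset formula by a parse-then-prefix-sum structure: one pass decodes all movements into a flat list of unit steps via a dict, a second pass accumulates running coordinates.
import Mathlib
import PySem

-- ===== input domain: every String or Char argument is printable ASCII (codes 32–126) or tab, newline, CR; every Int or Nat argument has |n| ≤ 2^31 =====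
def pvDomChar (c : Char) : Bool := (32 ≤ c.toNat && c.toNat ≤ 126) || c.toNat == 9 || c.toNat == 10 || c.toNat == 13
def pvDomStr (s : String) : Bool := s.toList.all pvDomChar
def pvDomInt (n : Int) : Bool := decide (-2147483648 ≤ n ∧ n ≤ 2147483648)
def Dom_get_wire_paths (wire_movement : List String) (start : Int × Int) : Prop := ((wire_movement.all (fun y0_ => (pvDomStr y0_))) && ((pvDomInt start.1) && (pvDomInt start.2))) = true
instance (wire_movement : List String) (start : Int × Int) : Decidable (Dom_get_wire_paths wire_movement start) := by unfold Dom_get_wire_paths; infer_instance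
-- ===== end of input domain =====

-- ===== PORT A =====
-- B changes the decomposition only (parse into unit steps, then prefix-sum); same return value; no argument is mutated.

-- helper `move_amount` of A: [(start[0]+(i+1)*off[0], start[1]+(i+1)*off[1]) for i in range(amount)]
def move_amount (start : Int × Int) (offset : Int × Int) (amount : Int) : List (Int × Int) :=
  (PySem.List.pyRange 0 amount 1).map
    (fun i => (start.1 + (i + 1) * offset.1, start.2 + (i + 1) * offset.2))

-- one iteration of A's loop; `none` propagates the raise (IndexError / ValueError)
def pvStepA (acc : Option (List (Int × Int))) (movement : String) : Option (List (Int × Int)) :=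
  match acc with
  | none => none
  | some visited =>
    match PySem.Str.pyGet? movement 0,
          PySem.Int.ofStr? (PySem.Str.slice movement (some 1) none) with
    | some direction, some amount =>
      let offset? : Option (Int × Int) :=
        if direction = 'U' then some (0, 1)
        else if direction = 'D' then some (0, -1)
        else if direction = 'R' then some (1, 0)
        else if direction = 'L' then some (-1, 0)
        else none
      match offset? with
      | some offset =>
        match PySem.List.pyGet? visited (-1) with
        | some last => some (visited ++ move_amount last offset amount)
        | none => none
      | none => none
    | _, _ => none

def get_wire_paths (wire_movement : List String) (start : Int × Int) : List (Int × Int) :=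
  (wire_movement.foldl pvStepA (some [start])).getD []

-- ===== PORT B =====
def pvOFFSETS : PySem.Dict Char (Int × Int) :=
  PySem.Dict.ofList [('U', (0, 1)), ('D', (0, -1)), ('R', (1, 0)), ('L', (-1, 0))]

-- pass 1 of B: one iteration of the step-decoding loop (steps += [OFFSETS[d]] * int(movement[1:]))
def pvStepB (acc : Option (List (Int × Int))) (movement : String) : Option (List (Int × Int)) :=
  match acc with
  | none => none
  | some steps =>
    match PySem.Str.pyGet? movement 0 with
    | none => none
    | some direction =>
      match PySem.Dict.get? pvOFFSETS direction with
      | none => none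
      | some off =>
        match PySem.Int.ofStr? (PySem.Str.slice movement (some 1) none) with
        | some amount => some (steps ++ List.replicate amount.toNat off)
        | none => none

-- pass 2 of B: the running-coordinate loop (x += dx; y += dy; visited.append((x, y)))
def pvScan (p : Int × Int) : List (Int × Int) → List (Int × Int)
  | [] => []
  | d :: ds => (p.1 + d.1, p.2 + d.2) :: pvScan (p.1 + d.1, p.2 + d.2) ds

def get_wire_paths_alt (wire_movement : List String) (start : Int × Int) : List (Int × Int) :=
  match wire_movement.foldl pvStepB (some []) with
  | none => []
  | some steps => start :: pvScan start steps

-- ===== PRECONDITION & SPEC =====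
-- Pre_ excludes exactly the inputs on which A raises: an empty movement string (IndexError),
-- a first character other than U/D/R/L (ValueError), or a tail that int() rejects (ValueError).
def Pre_get_wire_paths (wire_movement : List String) (start : Int × Int) : Prop :=
  ∀ m ∈ wire_movement,
    ((PySem.Str.pyGet? m 0).any
      (fun c => c == 'U' || c == 'D' || c == 'R' || c == 'L')) = true ∧
    (PySem.Int.ofStr? (PySem.Str.slice m (some 1) none)).isSome = true
instance (wire_movement : List String) (start : Int × Int) : Decidable (Pre_get_wire_paths wire_movement start) := by unfold Pre_get_wire_paths; infer_instance

def pvWitness_get_wire_paths : List String × (Int × Int) := (["R2", "U3", "L1", "D2"], (0, 0))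

def Spec_get_wire_paths (wire_movement : List String) (start : Int × Int) (out : List (Int × Int)) : Prop := out = get_wire_paths_alt wire_movement start
instance (wire_movement : List String) (start : Int × Int) (out : List (Int × Int)) : Decidable (Spec_get_wire_paths wire_movement start out) := by unfold Spec_get_wire_paths; infer_instance

-- ===== CLAIM (what is proved, stated in full; the proofs are below) =====
def Claim_equal_get_wire_paths : Prop := ∀ (wire_movement : List String) (start : Int × Int), Dom_get_wire_paths wire_movement start → Pre_get_wire_paths wire_movement start → Spec_get_wire_paths wire_movement start (get_wire_paths wire_movement start)

-- ===== LEMMAS AND PROOFS =====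

theorem pvScan_append (l1 l2 : List (Int × Int)) : ∀ p : Int × Int,
    pvScan p (l1 ++ l2)
      = pvScan p l1 ++ pvScan (l1.foldl (fun q d => (q.1 + d.1, q.2 + d.2)) p) l2 := by
  induction l1 with
  | nil => intro p; simp [pvScan]
  | cons d ds ih => intro p; simp [pvScan, ih]

theorem pvScan_replicate (n : Nat) : ∀ (p off : Int × Int),
    pvScan p (List.replicate n off)
      = (List.range n).map
          (fun (k : Nat) => (p.1 + ((k : Int) + 1) * off.1, p.2 + ((k : Int) + 1) * off.2)) := by
  induction n with
  | zero => intro p off; simp [pvScan]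
  | succ n ih =>
    intro p off
    rw [List.replicate_succ, List.range_succ_eq_map]
    simp only [pvScan, ih, List.map_cons, List.map_map]
    congr 1
    · simp
    · apply List.map_congr_left
      intro k _
      simp only [Function.comp]
      rw [Prod.mk.injEq]
      constructor <;> push_cast <;> ring

theorem move_amount_eq (p off : Int × Int) (amount : Int) :
    move_amount p off amount = pvScan p (List.replicate amount.toNat off) := by
  rw [move_amount, PySem.List.pyRange_one, pvScan_replicate, List.map_map, sub_zero]
  apply List.map_congr_left
  intro k _
  simp only [Function.comp, zero_add]

theorem pyGet?_neg_one_getLast {α : Type} (xs : List α) (hne : xs ≠ []) :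
    PySem.List.pyGet? xs (-1) = xs.getLast? := by
  have hlen : 0 < xs.length := List.length_pos_iff.mpr hne
  simp only [PySem.List.pyGet?, PySem.List.pyIdx?]
  rw [if_neg (by omega), if_pos (by omega : -(xs.length : Int) ≤ -1)]
  rw [List.getLast?_eq_getElem?]
  rfl

theorem getLast?_cons_pvScan (l : List (Int × Int)) : ∀ p : Int × Int,
    (p :: pvScan p l).getLast?
      = some (l.foldl (fun q d => (q.1 + d.1, q.2 + d.2)) p) := by
  induction l with
  | nil => intro p; rfl
  | cons d ds ih =>
    intro p
    simp only [pvScan, List.foldl_cons, List.getLast?_cons_cons]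
    exact ih (p.1 + d.1, p.2 + d.2)

theorem pvScan_foldl (acc : List (Int × Int)) (p : Int × Int) :
    PySem.List.pyGet? (p :: pvScan p acc) (-1)
      = some (acc.foldl (fun q d => (q.1 + d.1, q.2 + d.2)) p) := by
  rw [pyGet?_neg_one_getLast _ (by simp), getLast?_cons_pvScan]

-- A's if-chain and B's dict lookup agree: one lemma per step, instantiated at the four directions
theorem pvStep_case (m : String) (acc : List (Int × Int)) (p : Int × Int)
    (c : Char) (off : Int × Int) (amount : Int)
    (hc : PySem.Str.pyGet? m 0 = some c)
    (hamt : PySem.Int.ofStr? (PySem.Str.slice m (some 1) none) = some amount)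
    (hoffA : (if c = 'U' then some ((0 : Int), (1 : Int))
              else if c = 'D' then some (0, -1)
              else if c = 'R' then some (1, 0)
              else if c = 'L' then some (-1, 0)
              else none) = some off)
    (hoffB : PySem.Dict.get? pvOFFSETS c = some off) :
    pvStepA (some (p :: pvScan p acc)) m
        = some (p :: pvScan p (acc ++ List.replicate amount.toNat off)) ∧
    pvStepB (some acc) m = some (acc ++ List.replicate amount.toNat off) := by
  constructor
  · simp only [pvStepA, hc, hamt, hoffA, pvScan_foldl]
    rw [move_amount_eq, pvScan_append]
    rfl
  · simp only [pvStepB, hc, hoffB, hamt]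

-- main invariant: when every movement decodes, A's fold from `p :: pvScan p acc`
-- is the scan of B's accumulated flat step list
theorem pv_main (ms : List String)
    (h : ∀ m ∈ ms,
      ((PySem.Str.pyGet? m 0).any
        (fun c => c == 'U' || c == 'D' || c == 'R' || c == 'L')) = true ∧
      (PySem.Int.ofStr? (PySem.Str.slice m (some 1) none)).isSome = true) :
    ∀ (acc : List (Int × Int)) (p : Int × Int),
      ms.foldl pvStepA (some (p :: pvScan p acc))
        = (ms.foldl pvStepB (some acc)).map (fun steps => p :: pvScan p steps) := by
  induction ms with
  | nil => intro acc p; simp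
  | cons m ms ih =>
    intro acc p
    obtain ⟨hd, ha⟩ := h m (by simp)
    obtain ⟨amount, hamt⟩ := Option.isSome_iff_exists.mp ha
    have hih := ih (fun x hx => h x (by simp [hx]))
    cases hc : PySem.Str.pyGet? m 0 with
    | none => rw [hc] at hd; simp at hd
    | some c =>
      rw [hc] at hd
      have hc4 : c = 'U' ∨ c = 'D' ∨ c = 'R' ∨ c = 'L' := by simpa [or_assoc] using hd
      simp only [List.foldl_cons]
      rcases hc4 with rfl | rfl | rfl | rfl
      · obtain ⟨hA, hB⟩ := pvStep_case m acc p 'U' (0, 1) amount hc hamt rfl (by decide)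
        rw [hA, hB]; exact hih _ p
      · obtain ⟨hA, hB⟩ := pvStep_case m acc p 'D' (0, -1) amount hc hamt rfl (by decide)
        rw [hA, hB]; exact hih _ p
      · obtain ⟨hA, hB⟩ := pvStep_case m acc p 'R' (1, 0) amount hc hamt rfl (by decide)
        rw [hA, hB]; exact hih _ p
      · obtain ⟨hA, hB⟩ := pvStep_case m acc p 'L' (-1, 0) amount hc hamt rfl (by decide)
        rw [hA, hB]; exact hih _ p

-- ===== VERDICT (by name: the statement is the Claim_ definition above) =====
theorem get_wire_paths_spec : Claim_equal_get_wire_paths := by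
  intro wm start _ hpre
  unfold Spec_get_wire_paths get_wire_paths get_wire_paths_alt
  have h := pv_main wm hpre [] start
  simp only [pvScan] at h
  rw [h]
  cases hfold : wm.foldl pvStepB (some []) with
  | none => simp
  | some steps => simp
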